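-- pv_equiv track=rewrite | github.com/rene-in-na/cama-mm | tests/test_registration.py | _simulate_setroles_command
-- ===== SOURCE A (Python) =====
-- def _simulate_setroles_command(roles_input: str):
--     """
--     Simulate the parsing and deduplication logic from the /setroles command.
--     Returns the processed role list that would be passed to player_service.set_roles().
--     """
--     # This mirrors the logic in commands/registration.py set_roles method
--     cleaned = roles_input.replace(",", "").replace(" ", "")
--     role_list = list(cleaned)
--
--     valid_choices = ["1", "2", "3", "4", "5"]
--     for r in role_list:
--         if r not in valid_choices:
--             raise ValueError(f"Invalid role: {r}")
--
--     if not role_list: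
--         raise ValueError("Please provide at least one role.")
--
--     # Deduplicate while preserving order
--     role_list = list(dict.fromkeys(role_list))
--
--     return role_list
-- ===== SOURCE B (Python) =====
-- def _simulate_setroles_command(roles_input: str):
--     # Different strategy: instead of a seen-set/dict dedup scan, exploit the fixed
--     # 5-digit alphabet: record each valid digit's first-occurrence index and emit
--     # the digits sorted by that index (order-preserving dedup by construction).
--     cleaned = roles_input.replace(",", "").replace(" ", "")
--     bad = next((c for c in cleaned if c not in "12345"), None)
--     if bad is not None:
--         raise ValueError(f"Invalid role: {bad}")
--     if not cleaned:
--         raise ValueError("Please provide at least one role.")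
--     pairs = [(cleaned.index(d), d) for d in "12345" if d in cleaned]
--     pairs.sort(key=lambda p: p[0])
--     return [d for _, d in pairs]
-- ===== Notes on version B (the rewrite author's own statement) =====
-- stated objective: alternative
-- what changed: Replaces the seen-set/dict.fromkeys order-preserving dedup scan with an index-based scheme over the fixed 5-digit alphabet: collect each present digit's first-occurrence index and sort the digits by that index.
import Mathlib
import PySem

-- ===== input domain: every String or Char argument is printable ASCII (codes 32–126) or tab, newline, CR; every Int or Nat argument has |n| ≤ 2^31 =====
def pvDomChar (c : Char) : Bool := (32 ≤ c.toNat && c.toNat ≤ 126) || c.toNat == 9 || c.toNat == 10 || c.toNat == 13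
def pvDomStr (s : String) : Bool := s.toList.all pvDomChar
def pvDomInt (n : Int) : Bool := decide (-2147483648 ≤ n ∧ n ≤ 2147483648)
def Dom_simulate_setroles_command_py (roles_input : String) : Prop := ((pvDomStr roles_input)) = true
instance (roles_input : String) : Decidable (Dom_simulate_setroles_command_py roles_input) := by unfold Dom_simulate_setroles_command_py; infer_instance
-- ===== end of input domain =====

-- B replaces the dict.fromkeys dedup by an index scheme over the fixed 5-digit alphabet:
-- first-occurrence index of each present digit, digits sorted by that index; equivalence
-- proved on inputs where A returns (no ValueError).
-- shared transliteration of: cleaned = roles_input.replace(",", "").replace(" ", "")  (as its character list)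
def pvClean (roles_input : String) : List Char :=
  (PySem.Str.replace (PySem.Str.replace roles_input "," "") " " "").toList

-- ===== PORT A =====
-- raising branches (invalid role / empty role list) are outside Pre_ and return [] in the port
def pvAValidated (role_list : List String) : List String :=
  if role_list.all (fun r => r ∈ (["1", "2", "3", "4", "5"] : List String)) then
    if role_list.isEmpty then []  -- raise ValueError("Please provide at least one role.")
    else PySem.List.dedup role_list  -- list(dict.fromkeys(role_list))
  else []  -- raise ValueError(f"Invalid role: {r}")

def simulate_setroles_command_py (roles_input : String) : List String :=
  pvAValidated ((pvClean roles_input).map (fun c => String.ofList [c]))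

-- ===== PORT B =====
def pvDigits : List Char := ['1', '2', '3', '4', '5']

def simulate_setroles_command_py_alt (roles_input : String) : List String :=
  let cleaned := pvClean roles_input
  -- bad = next((c for c in cleaned if c not in "12345"), None)
  match cleaned.find? (fun c => !(pvDigits.contains c)) with
  | some _ => []  -- raise ValueError(f"Invalid role: {bad}")
  | none =>
    if cleaned.isEmpty then []  -- raise ValueError("Please provide at least one role.")
    else
      -- pairs = [(cleaned.index(d), d) for d in "12345" if d in cleaned]; pairs.sort(key=fst)
      let pairs := (pvDigits.filter (fun d => cleaned.contains d)).map
        (fun d => ((PySem.List.index? cleaned d).getD 0, d))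
      (PySem.List.sorted pairs (fun p => p.1) false).map (fun p => String.ofList [p.2])

-- ===== PRECONDITION & SPEC =====
-- Pre_ excludes exactly the inputs on which A raises ValueError: a character other than
-- "12345" and the stripped ',' and ' ' (invalid role), or no role digit at all (empty role list).
def Pre_simulate_setroles_command_py (roles_input : String) : Prop :=
  roles_input.toList.all (fun c => ([',', ' ', '1', '2', '3', '4', '5'] : List Char).contains c) = true ∧
  roles_input.toList.any (fun c => (['1', '2', '3', '4', '5'] : List Char).contains c) = true

instance (roles_input : String) : Decidable (Pre_simulate_setroles_command_py roles_input) := by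
  unfold Pre_simulate_setroles_command_py; infer_instance

def pvWitness_simulate_setroles_command_py : String := "12"

def Spec_simulate_setroles_command_py (roles_input : String) (out : List String) : Prop := out = simulate_setroles_command_py_alt roles_input
instance (roles_input : String) (out : List String) : Decidable (Spec_simulate_setroles_command_py roles_input out) := by unfold Spec_simulate_setroles_command_py; infer_instance

-- ===== CLAIM (what is proved, stated in full; the proofs are below) =====
def Claim_equal_simulate_setroles_command_py : Prop := ∀ (roles_input : String), Dom_simulate_setroles_command_py roles_input → Pre_simulate_setroles_command_py roles_input → Spec_simulate_setroles_command_py roles_input (simulate_setroles_command_py roles_input)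

-- ===== LEMMAS AND PROOFS =====

-- removing all occurrences of a single character is filtering it out
theorem replace_go_single (a : Char) (fuel : Nat) :
    ∀ (l acc : List Char), l.length ≤ fuel →
      PySem.Chars.replace.go [a] [] fuel l acc =
        acc.reverse ++ l.filter (fun c => !(c == a)) := by
  induction fuel with
  | zero =>
    intro l acc h
    have : l = [] := List.eq_nil_of_length_eq_zero (Nat.le_zero.mp h)
    subst this
    simp [PySem.Chars.replace.go]
  | succ fuel ih =>
    intro l acc h
    cases l with
    | nil => simp [PySem.Chars.replace.go]
    | cons c t =>
      rw [PySem.Chars.replace.go]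
      by_cases hc : a = c
      · subst hc
        simp only [List.isPrefixOf, BEq.rfl, Bool.true_and, if_true,
          List.length_cons, List.length_nil, List.drop_succ_cons, List.drop_zero,
          List.reverse_nil, List.nil_append]
        rw [ih t acc (by simpa using Nat.le_of_succ_le_succ h)]
        simp
      · have hbeq : (a == c) = false := by simp [hc]
        simp only [List.isPrefixOf, hbeq, Bool.false_and]
        rw [ih t (c :: acc) (by simpa using Nat.le_of_succ_le_succ h)]
        have : (c == a) = false := by simp [Ne.symm hc]
        simp [this]

theorem replace_single (cs : List Char) (a : Char) :
    PySem.Chars.replace cs [a] [] = cs.filter (fun c => !(c == a)) := by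
  rw [PySem.Chars.replace]
  simp only [List.isEmpty_cons, if_false, Bool.false_eq_true]
  exact replace_go_single a cs.length cs [] le_rfl

theorem pvClean_eq_filter (roles_input : String) :
    pvClean roles_input =
      roles_input.toList.filter (fun c => !(c == ',') && !(c == ' ')) := by
  unfold pvClean
  rw [PySem.Str.toList_replace, PySem.Str.toList_replace]
  show PySem.Chars.replace (PySem.Chars.replace roles_input.toList [','] []) [' '] [] = _
  rw [replace_single, replace_single, List.filter_filter]
  exact List.filter_congr (fun c _ => by simp [Bool.and_comm])

-- dedup of a snoc: keep the old dedup, append x only if new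
theorem dedup_append_singleton {α : Type} [BEq α] [LawfulBEq α] (l : List α) (x : α) :
    PySem.List.dedup (l ++ [x]) =
      if x ∈ PySem.List.dedup l then PySem.List.dedup l
      else PySem.List.dedup l ++ [x] := by
  rw [PySem.List.dedup_eq_ofList, PySem.List.dedup_eq_ofList,
      PySem.Set.ofList_eq_foldl, PySem.Set.ofList_eq_foldl, List.foldl_append]
  simp [PySem.Set.add, PySem.Set.contains]

-- dedup commutes with an injective map
theorem dedup_map_inj {α β : Type} [BEq α] [LawfulBEq α] [BEq β] [LawfulBEq β]
    (f : α → β) (hf : Function.Injective f) (l : List α) :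
    PySem.List.dedup (l.map f) = (PySem.List.dedup l).map f := by
  induction l using List.reverseRecOn with
  | nil => rfl
  | append_singleton l x ih =>
    rw [List.map_append, List.map_singleton, dedup_append_singleton,
        dedup_append_singleton, ih]
    by_cases hx : x ∈ PySem.List.dedup l
    · rw [if_pos (List.mem_map_of_mem hx), if_pos hx]
    · rw [if_neg (fun h => hx (by obtain ⟨a, ha, hfa⟩ := List.mem_map.mp h; rwa [hf hfa] at ha)),
          if_neg hx, List.map_append, List.map_singleton]

-- first-occurrence rank of an element (0 for absent elements, as in B's guarded .index)
def pvRank {α : Type} [BEq α] (l : List α) (a : α) : Nat :=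
  (PySem.List.index? l a).getD 0

-- dedup lists its elements in order of first occurrence
theorem dedup_pairwise_rank {α : Type} [BEq α] [LawfulBEq α] (l : List α) :
    (PySem.List.dedup l).Pairwise (fun a b => pvRank l a < pvRank l b) := by
  induction l using List.reverseRecOn with
  | nil => exact List.Pairwise.nil
  | append_singleton l x ih =>
    have hmem : ∀ a ∈ PySem.List.dedup l, a ∈ l := fun a ha =>
      (PySem.List.mem_dedup l a).mp ha
    have hrank : ∀ a ∈ PySem.List.dedup l, pvRank (l ++ [x]) a = pvRank l a := by
      intro a ha
      unfold pvRank
      rw [PySem.List.index?_append_of_mem [x] (hmem a ha)]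
    rw [dedup_append_singleton]
    by_cases hx : x ∈ PySem.List.dedup l
    · rw [if_pos hx]
      exact ih.imp_of_mem (fun {a b} ha hb h => by rwa [hrank a ha, hrank b hb])
    · rw [if_neg hx]
      have hxl : x ∉ l := fun h => hx ((PySem.List.mem_dedup l x).mpr h)
      refine List.pairwise_append.mpr ⟨?_, List.pairwise_singleton .., ?_⟩
      · exact ih.imp_of_mem (fun {a b} ha hb h => by rwa [hrank a ha, hrank b hb])
      · intro a ha b hb
        rw [List.mem_singleton] at hb
        subst hb
        rw [hrank a ha]
        unfold pvRank
        rw [PySem.List.index?_append_singleton_self _ _ hxl]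
        obtain ⟨i, hi⟩ := Option.isSome_iff_exists.mp
          ((PySem.List.index?_isSome_iff l a).mpr (hmem a ha))
        obtain ⟨hk, -, -⟩ := PySem.List.getElem_of_index?_eq_some hi
        rw [hi]
        simpa using hk

-- ===== VERDICT (by name: the statement is the Claim_ definition above) =====
set_option maxHeartbeats 1000000 in
theorem simulate_setroles_command_py_spec : Claim_equal_simulate_setroles_command_py := by
  intro roles_input _ hpre
  obtain ⟨hdom0, hex0⟩ := hpre
  have hdom : ∀ c ∈ roles_input.toList, c ∈ ([',', ' ', '1', '2', '3', '4', '5'] : List Char) := by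
    simpa using hdom0
  have hex : ∃ c ∈ roles_input.toList, c ∈ (['1', '2', '3', '4', '5'] : List Char) := by
    simpa using hex0
  have hval : ∀ c ∈ pvClean roles_input, c ∈ pvDigits := by
    intro c hc
    rw [pvClean_eq_filter] at hc
    obtain ⟨hmem, hkeep⟩ := List.mem_filter.mp hc
    have := hdom c hmem
    simp only [pvDigits, List.mem_cons, List.not_mem_nil, or_false] at this ⊢
    rcases this with h | h | h <;> simp_all
  have hne : pvClean roles_input ≠ [] := by
    obtain ⟨c, hcmem, hcdig⟩ := hex
    intro hnil
    have hc : c ∈ pvClean roles_input := by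
      rw [pvClean_eq_filter]
      refine List.mem_filter.mpr ⟨hcmem, ?_⟩
      fin_cases hcdig <;> decide
    rw [hnil] at hc
    exact absurd hc (List.not_mem_nil)
  have hfinj : Function.Injective (fun c => String.ofList [c]) := by
    intro a b h
    simpa using congrArg String.toList h
  unfold Spec_simulate_setroles_command_py
  unfold simulate_setroles_command_py simulate_setroles_command_py_alt
  simp only []
  -- A side: both guards pass, dedup commutes with the injective singleton-string map
  have hallA : ((pvClean roles_input).map (fun c => String.ofList [c])).all
      (fun r => r ∈ (["1", "2", "3", "4", "5"] : List String)) = true := by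
    simp only [List.all_eq_true, List.mem_map, decide_eq_true_eq]
    rintro r ⟨c, hc, rfl⟩
    have := hval c hc
    fin_cases this <;> decide
  have hmapne : (pvClean roles_input).map (fun c => String.ofList [c]) ≠ [] := by
    simpa using hne
  unfold pvAValidated
  rw [if_pos hallA, if_neg (by simpa [List.isEmpty_iff] using hmapne),
      dedup_map_inj _ hfinj]
  -- B side: no invalid character found, cleaned nonempty
  have hfind : (pvClean roles_input).find? (fun c => !(pvDigits.contains c)) = none := by
    refine List.find?_eq_none.mpr (fun c hc => ?_)
    simpa using hval c hc
  rw [hfind]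
  rw [if_neg (by simpa [List.isEmpty_iff] using hne)]
  -- name the sort's result: dedup in first-occurrence order is the strictly rank-increasing
  -- rearrangement of the collected (first index, digit) pairs
  have hsorted : PySem.List.sorted
      (((pvDigits.filter (fun d => (pvClean roles_input).contains d)).map
        (fun d => ((PySem.List.index? (pvClean roles_input) d).getD 0, d))))
      (fun p => p.1) false =
      (PySem.List.dedup (pvClean roles_input)).map
        (fun d => ((PySem.List.index? (pvClean roles_input) d).getD 0, d)) := by
    apply PySem.List.sorted_eq_of_perm_of_pairwise_lt
    · refine List.Perm.map _ ?_
      refine (List.perm_ext_iff_of_nodup (PySem.List.nodup_dedup _)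
        ((by decide : pvDigits.Nodup).filter _)).mpr (fun a => ?_)
      rw [PySem.List.mem_dedup, List.mem_filter]
      constructor
      · intro ha
        exact ⟨hval a ha, List.contains_iff_mem.mpr ha⟩
      · intro ⟨_, ha⟩
        exact List.contains_iff_mem.mp ha
    · rw [List.pairwise_map]
      simpa [pvRank] using dedup_pairwise_rank (pvClean roles_input)
  rw [hsorted, List.map_map]
  rfl
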